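-- pv_equiv track=rewrite | github.com/fine1337/amelia-cs2-cheatchecker | code/amelia.py | parse_vdf_content
-- ===== SOURCE A (Python) =====
-- def parse_vdf_content(content):
--     accounts = []
--     lines = content.splitlines()
--
--     current_entry = {}
--     entry_started = False
--
--     for line in lines:
--         line = line.strip()
--
--         # Пропускаем пустые строки и комментарии
--         if not line or line.startswith('//'):
--             continue
--
--         if line.startswith('"765'):
--             if entry_started and current_entry:
--                 accounts.append(current_entry)
--                 current_entry = {}
--             entry_started = True
--             current_entry['id'] = line.strip('"')
--         elif entry_started:
--             if '"' in line:
--                 parts = line.split('"', 2)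
--                 if len(parts) >= 3:
--                     key = parts[1].strip()
--                     value = parts[2].strip()
--                     current_entry[key] = value
--
--     if entry_started and current_entry:
--         accounts.append(current_entry)
--
--     return accounts
-- ===== SOURCE B (Python) =====
-- def parse_vdf_content(content):
--     # phase 1: cleaned token stream (stripped, no empties, no comments)
--     cleaned = [s for s in (ln.strip() for ln in content.splitlines())
--                if s and not s.startswith('//')]
--     # phase 2: drop everything before the first header line
--     j = 0
--     while j < len(cleaned) and not cleaned[j].startswith('"765'):
--         j += 1
--     rest = cleaned[j:]
--     # phase 3: cut off one block per header, map it to its dict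
--     result = []
--     while rest:
--         i = 1
--         while i < len(rest) and not rest[i].startswith('"765'):
--             i += 1
--         entry = {'id': rest[0].strip('"')}
--         for line in rest[1:i]:
--             if '"' in line:
--                 parts = line.split('"', 2)
--                 if len(parts) >= 3:
--                     entry[parts[1].strip()] = parts[2].strip()
--         result.append(entry)
--         rest = rest[i:]
--     return result
-- ===== Notes on version B (the rewrite author's own statement) =====
-- stated objective: alternative
-- what changed: A is a single-pass state machine carrying (accounts, current_entry, entry_started) through every raw line; B is a three-phase pipeline: build the cleaned token stream, drop the prologue before the first header line, then repeatedly cut one header-delimited block off the front and map it to its dict.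
import Mathlib
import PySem

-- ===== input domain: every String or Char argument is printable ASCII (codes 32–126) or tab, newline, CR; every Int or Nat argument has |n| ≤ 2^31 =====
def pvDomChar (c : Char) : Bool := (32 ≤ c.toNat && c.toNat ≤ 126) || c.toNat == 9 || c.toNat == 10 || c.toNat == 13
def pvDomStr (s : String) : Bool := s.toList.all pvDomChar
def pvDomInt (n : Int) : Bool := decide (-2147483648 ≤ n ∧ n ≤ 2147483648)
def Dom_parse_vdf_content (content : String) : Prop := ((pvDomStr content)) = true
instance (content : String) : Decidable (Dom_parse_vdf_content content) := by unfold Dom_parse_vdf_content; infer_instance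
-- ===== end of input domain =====

-- B re-decomposes A's one-pass state machine as clean-lines / drop-prologue / cut-one-block-per-header;
-- same return value (objective: alternative decomposition, not faster).

-- ===== PORT A =====
-- shared helper: the key/value-line fragment is textually identical in both Pythons
-- (if '"' in line: parts = line.split('"', 2); if len(parts) >= 3: entry[parts[1].strip()] = parts[2].strip())
def pvKV (cur : PySem.Dict String String) (line : String) : PySem.Dict String String :=
  if PySem.Str.isIn "\"" line then
    match PySem.Str.splitMax? line "\"" 2 with
    | some (_ :: p1 :: p2 :: _) => cur.insert (PySem.Str.strip p1) (PySem.Str.strip p2)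
    | _ => cur
  else cur

-- one iteration of A's for-loop; state = (accounts, current_entry, entry_started)
def pvAStep (st : List (PySem.Dict String String) × PySem.Dict String String × Bool)
    (line0 : String) : List (PySem.Dict String String) × PySem.Dict String String × Bool :=
  let line := PySem.Str.strip line0
  if line == "" || PySem.Str.startswith line "//" then st
  else if PySem.Str.startswith line "\"765" then
    let acc := if st.2.2 && !st.2.1.items.isEmpty then st.1 ++ [st.2.1] else st.1
    let cur := if st.2.2 && !st.2.1.items.isEmpty then PySem.Dict.empty else st.2.1
    (acc, cur.insert "id" (PySem.Str.stripChars line "\""), true)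
  else if st.2.2 then (st.1, pvKV st.2.1 line, st.2.2)
  else st

def parse_vdf_content (content : String) : List (List (String × String)) :=
  let st := (PySem.Str.splitlines content).foldl pvAStep ([], PySem.Dict.empty, false)
  (if st.2.2 && !st.2.1.items.isEmpty then st.1 ++ [st.2.1] else st.1).map PySem.Dict.items

-- ===== PORT B =====
def pvHdr (s : String) : Bool := PySem.Str.startswith s "\"765"

-- phase 1: cleaned token stream
def pvClean (content : String) : List String :=
  ((PySem.Str.splitlines content).map PySem.Str.strip).filter
    (fun s => !(s == "") && !PySem.Str.startswith s "//")

-- one block's dict: 'id' from the header, then the body's key/value lines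
def pvEntry (header : String) (body : List String) : PySem.Dict String String :=
  body.foldl pvKV ((PySem.Dict.empty).insert "id" (PySem.Str.stripChars header "\""))

-- phase 3: Source B's outer while loop — cut off one block per header
def pvEntries : List String → List (PySem.Dict String String)
  | [] => []
  | h :: tl =>
    pvEntry h (tl.takeWhile (fun s => !pvHdr s)) ::
      pvEntries (tl.dropWhile (fun s => !pvHdr s))
termination_by l => l.length
decreasing_by simpa using Nat.lt_succ_of_le (List.length_dropWhile_le _ _)

def parse_vdf_content_alt (content : String) : List (List (String × String)) :=
  (pvEntries ((pvClean content).dropWhile (fun s => !pvHdr s))).map PySem.Dict.items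

-- ===== PRECONDITION & SPEC =====
def Spec_parse_vdf_content (content : String) (out : List (List (String × String))) : Prop := out = parse_vdf_content_alt content
instance (content : String) (out : List (List (String × String))) : Decidable (Spec_parse_vdf_content content out) := by unfold Spec_parse_vdf_content; infer_instance

-- ===== CLAIM (what is proved, stated in full; the proofs are below) =====
def Claim_equal_parse_vdf_content : Prop := ∀ (content : String), Dom_parse_vdf_content content → Spec_parse_vdf_content content (parse_vdf_content content)

-- ===== LEMMAS AND PROOFS =====

-- A's step on an already-stripped, kept (non-empty, non-comment) line
def pvStepC (st : List (PySem.Dict String String) × PySem.Dict String String × Bool)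
    (line : String) : List (PySem.Dict String String) × PySem.Dict String String × Bool :=
  if pvHdr line then
    let acc := if st.2.2 && !st.2.1.items.isEmpty then st.1 ++ [st.2.1] else st.1
    let cur := if st.2.2 && !st.2.1.items.isEmpty then PySem.Dict.empty else st.2.1
    (acc, cur.insert "id" (PySem.Str.stripChars line "\""), true)
  else if st.2.2 then (st.1, pvKV st.2.1 line, st.2.2)
  else st

-- A's tail: append the pending entry if the loop ended inside one
def pvAfin (st : List (PySem.Dict String String) × PySem.Dict String String × Bool) :
    List (PySem.Dict String String) :=
  if st.2.2 && !st.2.1.items.isEmpty then st.1 ++ [st.2.1] else st.1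

lemma pvAStep_eq (st : List (PySem.Dict String String) × PySem.Dict String String × Bool)
    (l : String) :
    pvAStep st l =
      if PySem.Str.strip l == "" || PySem.Str.startswith (PySem.Str.strip l) "//" then st
      else pvStepC st (PySem.Str.strip l) := rfl

lemma foldl_clean (lines : List String)
    (st : List (PySem.Dict String String) × PySem.Dict String String × Bool) :
    lines.foldl pvAStep st =
      ((lines.map PySem.Str.strip).filter
        (fun s => !(s == "") && !PySem.Str.startswith s "//")).foldl pvStepC st := by
  induction lines generalizing st with
  | nil => rfl
  | cons l tl ih =>
    simp only [List.foldl_cons, List.map_cons, List.filter_cons, pvAStep_eq]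
    by_cases h : (PySem.Str.strip l == "" || PySem.Str.startswith (PySem.Str.strip l) "//") = true
    · have hk : (!(PySem.Str.strip l == "") && !PySem.Str.startswith (PySem.Str.strip l) "//") = false := by
        rcases Bool.or_eq_true_iff.mp h with h1 | h1 <;> rw [h1]
        · rfl
        · simp only [Bool.not_true, Bool.and_false]
      rw [if_pos h, hk]
      simpa using ih st
    · have hk : (!(PySem.Str.strip l == "") && !PySem.Str.startswith (PySem.Str.strip l) "//") = true := by
        rcases Bool.or_eq_false_iff.mp (Bool.eq_false_iff.mpr h) with ⟨h1, h2⟩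
        rw [h1, h2]
        rfl
      rw [if_neg h, hk]
      simpa using ih (pvStepC st (PySem.Str.strip l))

lemma insert_items_ne_nil (d : PySem.Dict String String) (k v : String) :
    (d.insert k v).items ≠ [] := by
  rw [PySem.Dict.items_insert]
  split_ifs with h
  · intro hnil
    rw [List.map_eq_nil_iff] at hnil
    rw [PySem.Dict.contains_iff_mem_keys] at h
    have hk : d.keys = d.items.map Prod.fst := List.toList_toArray
    rw [hk, hnil] at h
    simp at h
  · simp

lemma pvKV_items_ne_nil (cur : PySem.Dict String String) (l : String)
    (h : cur.items ≠ []) : (pvKV cur l).items ≠ [] := by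
  unfold pvKV
  split_ifs
  · rcases hs : PySem.Str.splitMax? l "\"" 2 with _ | parts
    · exact h
    · match parts with
      | [] => exact h
      | [_] => exact h
      | [_, _] => exact h
      | _ :: p1 :: p2 :: _ => exact insert_items_ne_nil _ _ _
  · exact h

lemma foldl_started (ls : List String) (acc : List (PySem.Dict String String))
    (cur : PySem.Dict String String) (hcur : cur.items ≠ []) :
    pvAfin (ls.foldl pvStepC (acc, cur, true)) =
      acc ++ (ls.takeWhile (fun s => !pvHdr s)).foldl pvKV cur ::
        pvEntries (ls.dropWhile (fun s => !pvHdr s)) := by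
  induction ls generalizing acc cur with
  | nil => simp [pvAfin, pvEntries, hcur]
  | cons l tl ih =>
    by_cases h : pvHdr l
    · have hstep : pvStepC (acc, cur, true) l =
          (acc ++ [cur], PySem.Dict.empty.insert "id" (PySem.Str.stripChars l "\""), true) := by
        simp [pvStepC, h, hcur]
      simp only [List.foldl_cons, hstep]
      rw [ih _ _ (insert_items_ne_nil _ _ _)]
      rw [List.takeWhile_cons_of_neg (by simp [h]), List.dropWhile_cons_of_neg (by simp [h])]
      rw [pvEntries]
      simp [pvEntry]
    · have hstep : pvStepC (acc, cur, true) l = (acc, pvKV cur l, true) := by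
        simp [pvStepC, h]
      simp only [List.foldl_cons, hstep]
      rw [ih _ _ (pvKV_items_ne_nil _ _ hcur)]
      rw [List.takeWhile_cons_of_pos (by simp [h]), List.dropWhile_cons_of_pos (by simp [h])]
      simp

lemma foldl_unstarted (ls : List String) (acc : List (PySem.Dict String String)) :
    pvAfin (ls.foldl pvStepC (acc, PySem.Dict.empty, false)) =
      acc ++ pvEntries (ls.dropWhile (fun s => !pvHdr s)) := by
  induction ls generalizing acc with
  | nil => simp [pvAfin, pvEntries]
  | cons l tl ih =>
    by_cases h : pvHdr l
    · have hstep : pvStepC (acc, PySem.Dict.empty, false) l =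
          (acc, PySem.Dict.empty.insert "id" (PySem.Str.stripChars l "\""), true) := by
        simp [pvStepC, h]
      simp only [List.foldl_cons, hstep]
      rw [foldl_started _ _ _ (insert_items_ne_nil _ _ _)]
      rw [List.dropWhile_cons_of_neg (by simp [h])]
      rw [pvEntries]
      simp [pvEntry]
    · have hstep : pvStepC (acc, PySem.Dict.empty, false) l = (acc, PySem.Dict.empty, false) := by
        simp [pvStepC, h]
      simp only [List.foldl_cons, hstep]
      rw [ih, List.dropWhile_cons_of_pos (by simp [h])]

-- ===== VERDICT (by name: the statement is the Claim_ definition above) =====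
theorem parse_vdf_content_spec : Claim_equal_parse_vdf_content := by
  intro content _
  unfold Spec_parse_vdf_content
  simp only [parse_vdf_content, parse_vdf_content_alt, pvClean]
  rw [foldl_clean]
  have h := foldl_unstarted
      (((PySem.Str.splitlines content).map PySem.Str.strip).filter
        (fun s => !(s == "") && !PySem.Str.startswith s "//")) []
  simp only [pvAfin, List.nil_append] at h
  rw [h]
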